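-- pv_equiv track=rewrite | github.com/jacobmischka/ite-basic-missed-topics | percentile_plotting.py | parse_norm_table
-- ===== SOURCE A (Python) =====
-- def parse_norm_table(norm_table_text):
--     year_names = []
--     years = []
--
--     in_header = True
--     last_row = False
--
--     for line in norm_table_text.splitlines():
--         line = line.strip()
--
--         if in_header:
--             if line == "New":
--                 in_header = False
--             else:
--                 continue
--
--         if line.startswith("("):
--             continue
--
--         words = line.split(" ")
--         if len(words) == 0:
--             continue
--
--         if len(words) == 1:
--             year_names.append(words[0])
--             years.append({})
--         else:
--             if words[0] == "<=":
--                 words.pop(0)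
--                 last_row = True
--
--             scaled_score = int(words.pop(0))
--
--             for i, percentile_rank in enumerate(words):
--                 years[i][scaled_score] = int(percentile_rank)
--
--                 if last_row:
--                     for score in range(scaled_score - 1, 0, -1):
--                         years[i][score] = int(percentile_rank)
--
--             if last_row:
--                 break
--
--     return {year_name: years[i] for i, year_name in enumerate(year_names)}
-- ===== SOURCE B (Python) =====
-- def parse_norm_table(norm_table_text):
--     # Phase 1: a single scan that only COLLECTS year names and parsed rows;
--     # Phase 2 builds each year's dict from the collected rows.
--     year_names = []
--     rows = []  # (scaled_score, [rank per year], is_last_row)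
--
--     in_header = True
--     for raw in norm_table_text.splitlines():
--         line = raw.strip()
--         if in_header:
--             if line != "New":
--                 continue
--             in_header = False
--         if line.startswith("("):
--             continue
--         words = line.split(" ")
--         if len(words) == 1:
--             year_names.append(words[0])
--         else:
--             last = words[0] == "<="
--             if last:
--                 words = words[1:]
--             rows.append((int(words[0]), [int(w) for w in words[1:]], last))
--             if last:
--                 break
--
--     result = {}
--     for i, name in enumerate(year_names):
--         d = {}
--         for scaled, ranks, last in rows:
--             if i < len(ranks):
--                 d[scaled] = ranks[i]
--                 if last:
--                     for score in range(scaled - 1, 0, -1):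
--                         d[score] = ranks[i]
--         result[name] = d
--     return result
-- ===== Notes on version B (the rewrite author's own statement) =====
-- stated objective: alternative
-- what changed: A builds the per-year dicts by mutating them inline while parsing; B first materialises the year names and parsed rows in one scan, then builds each year's dict in a separate second pass over the collected rows.
import Mathlib
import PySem

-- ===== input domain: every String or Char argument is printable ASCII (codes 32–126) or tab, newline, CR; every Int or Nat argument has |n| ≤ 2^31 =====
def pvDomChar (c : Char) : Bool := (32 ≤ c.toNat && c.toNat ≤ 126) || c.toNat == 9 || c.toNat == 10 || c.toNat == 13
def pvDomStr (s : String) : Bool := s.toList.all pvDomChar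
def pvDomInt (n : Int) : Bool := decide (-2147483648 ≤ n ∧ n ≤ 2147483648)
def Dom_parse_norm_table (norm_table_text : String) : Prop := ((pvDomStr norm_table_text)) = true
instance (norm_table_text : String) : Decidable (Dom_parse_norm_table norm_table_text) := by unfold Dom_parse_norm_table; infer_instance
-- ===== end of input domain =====

-- B re-decomposes A's single mutating pass into parse-then-build (collect year names and parsed
-- rows first, build each year's dict in a second pass); same cost, different structure ("alternative").

-- ===== PORT A =====
-- years[i][scaled_score] = int(w), plus the final fill-down for the last row
def pvAddRowA (d : PySem.Dict Int Int) (scaled : Int) (w : String) (last : Bool) : PySem.Dict Int Int :=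
  let r := (PySem.Int.ofStr? w).getD 0   -- int(w); ValueError excluded by Pre_
  let d1 := d.insert scaled r
  if last then (PySem.List.pyRange (scaled - 1) 0 (-1)).foldl (fun dd s => dd.insert s r) d1 else d1

-- the 'for i, percentile_rank in enumerate(words)' loop
def pvUpdateA (ys : List (PySem.Dict Int Int)) (scaled : Int) (ranks : List String) (last : Bool) :
    List (PySem.Dict Int Int) :=
  (PySem.List.enumerate ranks).foldl
    (fun ys p => ys.modify p.1.toNat (fun d => pvAddRowA d scaled p.2 last)) ys
  -- years[i]: IndexError for i ≥ len(years) is excluded by Pre_ (modify is a no-op there)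

def pvLoopA : List String → List String → List (PySem.Dict Int Int) → Bool →
    List String × List (PySem.Dict Int Int)
  | [], yn, ys, _ => (yn, ys)
  | l :: rest, yn, ys, inh =>
    let line := PySem.Str.strip l
    if inh && !(line == "New") then pvLoopA rest yn ys inh
    else if PySem.Str.startswith line "(" then pvLoopA rest yn ys false
    else
      let ws := (PySem.Str.split? line " ").getD []   -- line.split(" "): sep ≠ "" never raises
      if ws.length = 0 then pvLoopA rest yn ys false
      else if ws.length = 1 then pvLoopA rest (yn ++ [ws.headI]) (ys ++ [PySem.Dict.empty]) false
      else
        let last := ws.headI == "<="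
        let ws1 := if last then ws.tail else ws
        let scaled := (PySem.Int.ofStr? ws1.headI).getD 0   -- int(words.pop(0)); ValueError excluded by Pre_
        let ys' := pvUpdateA ys scaled ws1.tail last
        if last then (yn, ys') else pvLoopA rest yn ys' false

def parse_norm_table (norm_table_text : String) : List (String × List (Int × Int)) :=
  let r := pvLoopA (PySem.Str.splitlines norm_table_text) [] [] true
  ((PySem.List.enumerate r.1).foldl
    (fun d p => d.insert p.2 ((PySem.List.pyGet? r.2 p.1).getD PySem.Dict.empty).items)
    (PySem.Dict.empty : PySem.Dict String (List (Int × Int)))).items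

-- ===== PORT B =====
-- Phase 1: collect year names and rows (scaled_score, parsed ranks, is_last_row)
def pvLoopB : List String → Bool → List String → List (Int × List Int × Bool) →
    List String × List (Int × List Int × Bool)
  | [], _, yn, rs => (yn, rs)
  | l :: rest, inh, yn, rs =>
    let line := PySem.Str.strip l
    if inh && !(line == "New") then pvLoopB rest inh yn rs
    else if PySem.Str.startswith line "(" then pvLoopB rest false yn rs
    else
      let ws := (PySem.Str.split? line " ").getD []
      if ws.length = 1 then pvLoopB rest false (yn ++ [ws.headI]) rs
      else
        let last := ws.headI == "<="
        let ws1 := if last then ws.tail else ws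
        let row := ((PySem.Int.ofStr? ws1.headI).getD 0,
                    ws1.tail.map (fun w => (PySem.Int.ofStr? w).getD 0), last)
        if last then (yn, rs ++ [row]) else pvLoopB rest false yn (rs ++ [row])

-- Phase 2: the body of Source B's 'for scaled, ranks, last in rows' loop for year index i
def pvApplyB (i : Nat) (d : PySem.Dict Int Int) (row : Int × List Int × Bool) : PySem.Dict Int Int :=
  if i < row.2.1.length then
    let r := row.2.1.getD i 0
    let d1 := d.insert row.1 r
    if row.2.2 then (PySem.List.pyRange (row.1 - 1) 0 (-1)).foldl (fun dd s => dd.insert s r) d1 else d1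
  else d

def pvBuildYearB (rows : List (Int × List Int × Bool)) (i : Nat) : PySem.Dict Int Int :=
  rows.foldl (pvApplyB i) PySem.Dict.empty

def parse_norm_table_alt (norm_table_text : String) : List (String × List (Int × Int)) :=
  let r := pvLoopB (PySem.Str.splitlines norm_table_text) true [] []
  let years := (List.range r.1.length).map (pvBuildYearB r.2)
  ((PySem.List.enumerate r.1).foldl
    (fun d p => d.insert p.2 ((PySem.List.pyGet? years p.1).getD PySem.Dict.empty).items)
    (PySem.Dict.empty : PySem.Dict String (List (Int × Int)))).items

-- ===== PRECONDITION & SPEC =====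
-- Pre_ is a shape condition on the kept lines (those after the first stripped "New" line, minus
-- "("-lines): every data row (≠ 1 word, with a leading "<=" marker dropped) that occurs no later
-- than the first "<="-row must consist of int-parsable fields and have at most as many rank
-- columns as there are one-word (year-header) lines before it. It excludes exactly the inputs
-- where A raises (ValueError from int(), IndexError from years[i]).
def pvWords (l : String) : List String := (PySem.Str.split? (PySem.Str.strip l) " ").getD []
def pvIsYear (l : String) : Bool := (pvWords l).length == 1
def pvIsLast (l : String) : Bool := !pvIsYear l && ((pvWords l).headI == "<=")
def pvFields (l : String) : List String :=
  if (pvWords l).headI == "<=" then (pvWords l).tail else pvWords l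
def pvKept (t : String) : List String :=
  ((PySem.Str.splitlines t).dropWhile (fun l => !(PySem.Str.strip l == "New"))).filter
    (fun l => !PySem.Str.startswith (PySem.Str.strip l) "(")

def Pre_parse_norm_table (norm_table_text : String) : Prop :=
  ∀ i < (pvKept norm_table_text).length,
    pvIsYear ((pvKept norm_table_text).getD i "") = false →
    ((pvKept norm_table_text).take i).all (fun l => !pvIsLast l) = true →
    (pvFields ((pvKept norm_table_text).getD i "")).all
        (fun w => (PySem.Int.ofStr? w).isSome) = true ∧
    (pvFields ((pvKept norm_table_text).getD i "")).tail.length ≤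
      (((pvKept norm_table_text).take i).filter (fun l => pvIsYear l)).length
instance (norm_table_text : String) : Decidable (Pre_parse_norm_table norm_table_text) := by
  unfold Pre_parse_norm_table; infer_instance

def pvWitness_parse_norm_table : String :=
  "ignored\nNew\n2019\n2020\n(note)\n10 99 98\n<= 9 50 40\nafter"

def Spec_parse_norm_table (norm_table_text : String) (out : List (String × List (Int × Int))) : Prop :=
  out = parse_norm_table_alt norm_table_text
instance (norm_table_text : String) (out : List (String × List (Int × Int))) :
    Decidable (Spec_parse_norm_table norm_table_text out) := by
  unfold Spec_parse_norm_table; infer_instance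

-- ===== CLAIM (what is proved, stated in full; the proofs are below) =====
def Claim_equal_parse_norm_table : Prop :=
  ∀ (norm_table_text : String), Dom_parse_norm_table norm_table_text →
    Pre_parse_norm_table norm_table_text →
    Spec_parse_norm_table norm_table_text (parse_norm_table norm_table_text)

-- ===== LEMMAS AND PROOFS =====

-- pvOk re-states Pre_ in the recursion structure of the loops (proof-side only; Pre_ itself
-- is the closed-form condition above)
def pvOk : List String → Nat → Bool → Bool
  | [], _, _ => true
  | l :: rest, n, inh =>
    let line := PySem.Str.strip l
    if inh && !(line == "New") then pvOk rest n inh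
    else if PySem.Str.startswith line "(" then pvOk rest n false
    else
      let ws := (PySem.Str.split? line " ").getD []
      if ws.length = 1 then pvOk rest (n + 1) false
      else
        let ws1 := if ws.headI == "<=" then ws.tail else ws
        ws1.all (fun w => (PySem.Int.ofStr? w).isSome) && decide (ws1.tail.length ≤ n) &&
          (ws.headI == "<=" || pvOk rest n false)

def pvKeptFrom (ls : List String) (inh : Bool) : List String :=
  (if inh then ls.dropWhile (fun l => !(PySem.Str.strip l == "New")) else ls).filter
    (fun l => !PySem.Str.startswith (PySem.Str.strip l) "(")

theorem pvOk_of_cond : ∀ (ls : List String) (n : Nat) (inh : Bool),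
    (∀ i < (pvKeptFrom ls inh).length,
      pvIsYear ((pvKeptFrom ls inh).getD i "") = false →
      ((pvKeptFrom ls inh).take i).all (fun l => !pvIsLast l) = true →
      (pvFields ((pvKeptFrom ls inh).getD i "")).all (fun w => (PySem.Int.ofStr? w).isSome) = true ∧
      (pvFields ((pvKeptFrom ls inh).getD i "")).tail.length ≤
        n + (((pvKeptFrom ls inh).take i).filter (fun l => pvIsYear l)).length) →
    pvOk ls n inh = true := by
  intro ls
  induction ls with
  | nil => intro n inh _; rfl
  | cons l rest ih =>
    intro n inh H
    rw [pvOk]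
    cases hg : (inh && !(PySem.Str.strip l == "New")) with
    | true =>
      simp only [if_true]
      apply ih
      have hinh : inh = true := by
        cases inh
        · simp at hg
        · rfl
      have hkept : pvKeptFrom (l :: rest) inh = pvKeptFrom rest inh := by
        rw [hinh] at hg ⊢
        simp only [Bool.true_and] at hg
        simp only [pvKeptFrom, if_true, List.dropWhile_cons, hg]
      rw [hkept] at H
      exact H
    | false =>
      simp only [Bool.false_eq_true, if_false]
      have hkept0 : pvKeptFrom (l :: rest) inh =
          (l :: rest).filter (fun l => !PySem.Str.startswith (PySem.Str.strip l) "(") := by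
        cases inh
        · rfl
        · simp only [Bool.true_and] at hg
          simp only [pvKeptFrom, if_true, List.dropWhile_cons, hg, Bool.false_eq_true, if_false]
      cases hp : PySem.Str.startswith (PySem.Str.strip l) "(" with
      | true =>
        simp only [if_true]
        apply ih
        have hkept : pvKeptFrom (l :: rest) inh = pvKeptFrom rest false := by
          rw [hkept0]
          simp only [pvKeptFrom, Bool.false_eq_true, if_false, List.filter_cons, hp,
            Bool.not_true]
        rw [hkept] at H
        exact H
      | false =>
        simp only [Bool.false_eq_true, if_false]
        have hkept : pvKeptFrom (l :: rest) inh = l :: pvKeptFrom rest false := by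
          rw [hkept0]
          simp only [pvKeptFrom, Bool.false_eq_true, if_false, List.filter_cons, hp,
            Bool.not_false, if_true]
        rw [hkept] at H
        by_cases h1 : ((PySem.Str.split? (PySem.Str.strip l) " ").getD []).length = 1
        · rw [if_pos h1]
          apply ih
          intro i hi hy ha
          have := H (i + 1) (by simpa using hi) (by simpa using hy)
            (by simp only [List.take_succ_cons, List.all_cons, Bool.and_eq_true]
                refine ⟨?_, by simpa using ha⟩
                simp [pvIsLast, pvIsYear, pvWords, h1])
          refine ⟨this.1, ?_⟩
          refine le_trans this.2 (le_of_eq ?_)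
          simp only [List.take_succ_cons, List.filter_cons]
          have hy1 : pvIsYear l = true := by simp [pvIsYear, pvWords, h1]
          rw [hy1]
          simp only [if_true, List.length_cons]
          omega
        · rw [if_neg h1]
          have hy0 : pvIsYear l = false := by
            simp only [pvIsYear, pvWords]; exact beq_eq_false_iff_ne.mpr h1
          have h0 := H 0 (by simp) (by simpa using hy0) (by simp)
          simp only [List.getD_cons_zero, List.take_zero, List.filter_nil, List.length_nil,
            Nat.add_zero, pvFields, pvWords] at h0
          cases hlast : (((PySem.Str.split? (PySem.Str.strip l) " ").getD []).headI == "<=") with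
          | true =>
            rw [hlast] at h0
            simp only [if_true, List.length_tail] at h0
            have h2 := h0.2
            simp [h0.1]
            omega
          | false =>
            rw [hlast] at h0
            simp only [Bool.false_eq_true, if_false] at h0
            have hrest : pvOk rest n false = true := by
              apply ih
              intro i hi hy ha
              have := H (i + 1) (by simpa using hi) (by simpa using hy)
                (by simp only [List.take_succ_cons, List.all_cons, Bool.and_eq_true]
                    refine ⟨?_, by simpa using ha⟩
                    simp [pvIsLast, pvWords, hy0, hlast])
              refine ⟨this.1, ?_⟩
              refine le_trans this.2 (le_of_eq ?_)
              simp only [List.take_succ_cons, List.filter_cons, hy0, Bool.false_eq_true, if_false]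
            simp only [List.length_tail] at h0
            have h2 := h0.2
            simp [h0.1, hrest]
            omega

theorem pvUpdateA_go_getElem? (scaled : Int) (last : Bool) :
    ∀ (ranks : List String) (s : Nat) (ys : List (PySem.Dict Int Int)) (j : Nat),
      ((PySem.List.enumerate ranks (s : Int)).foldl
          (fun ys p => ys.modify p.1.toNat (fun d => pvAddRowA d scaled p.2 last)) ys)[j]? =
        if s ≤ j ∧ j < s + ranks.length then
          ys[j]?.map (fun d => pvAddRowA d scaled (ranks.getD (j - s) "") last)
        else ys[j]? := by
  intro ranks
  induction ranks with
  | nil =>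
    intro s ys j
    rw [if_neg (by simp only [List.length_nil]; omega)]
    simp [PySem.List.enumerate]
  | cons a ranks ih =>
    intro s ys j
    rw [PySem.List.enumerate_cons, List.foldl_cons]
    have hcast : ((s : Int) + 1) = ((s + 1 : Nat) : Int) := by push_cast; ring
    rw [hcast, ih (s + 1)]
    have hts : ((s : Int)).toNat = s := by omega
    simp only [hts, List.getElem?_modify, List.length_cons]
    by_cases h1 : j = s
    · rw [h1]
      rw [if_neg (by omega), if_pos (by omega : s ≤ s ∧ s < s + (ranks.length + 1))]
      simp
    · by_cases h2 : s + 1 ≤ j ∧ j < s + 1 + ranks.length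
      · rw [if_pos h2, if_pos (by omega : s ≤ j ∧ j < s + (ranks.length + 1))]
        have hgd : (a :: ranks).getD (j - s) "" = ranks.getD (j - (s + 1)) "" := by
          have h3 : j - s = (j - (s + 1)) + 1 := by omega
          rw [h3]; rfl
        rw [hgd]
        cases ys[j]? <;> simp [Ne.symm h1]
      · rw [if_neg h2, if_neg (by omega : ¬ (s ≤ j ∧ j < s + (ranks.length + 1)))]
        cases ys[j]? <;> simp [Ne.symm h1]

theorem pvApplyB_eq (scaled : Int) (last : Bool) (ranks : List String) (j : Nat)
    (d : PySem.Dict Int Int) :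
    pvApplyB j d (scaled, ranks.map (fun w => (PySem.Int.ofStr? w).getD 0), last) =
      if j < ranks.length then pvAddRowA d scaled (ranks.getD j "") last else d := by
  by_cases hj : j < ranks.length
  · rw [if_pos hj]
    simp [pvApplyB, pvAddRowA, hj]
  · rw [if_neg hj]
    simp [pvApplyB, hj]

theorem pvApplyB_of_le (j : Nat) (d : PySem.Dict Int Int) (row : Int × List Int × Bool)
    (h : row.2.1.length ≤ j) : pvApplyB j d row = d := by
  simp [pvApplyB, Nat.not_lt.mpr h]

theorem pvUpdateA_eq_mapIdx (ys : List (PySem.Dict Int Int)) (scaled : Int) (ranks : List String)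
    (last : Bool) :
    pvUpdateA ys scaled ranks last =
      ys.mapIdx (fun j d =>
        pvApplyB j d (scaled, ranks.map (fun w => (PySem.Int.ofStr? w).getD 0), last)) := by
  apply List.ext_getElem?
  intro j
  rw [pvUpdateA]
  have h0 : ((0 : Int)) = ((0 : Nat) : Int) := rfl
  rw [h0, pvUpdateA_go_getElem? scaled last ranks 0 ys j, List.getElem?_mapIdx]
  by_cases hj : j < ranks.length
  · rw [if_pos (by omega)]
    cases hy : ys[j]? <;> simp [pvApplyB_eq, hj]
  · rw [if_neg (by omega)]
    cases hy : ys[j]? <;> simp [pvApplyB_eq, hj]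

theorem pvUpdateA_length (ys : List (PySem.Dict Int Int)) (scaled : Int) (ranks : List String)
    (last : Bool) : (pvUpdateA ys scaled ranks last).length = ys.length := by
  rw [pvUpdateA_eq_mapIdx]; simp

theorem pvLoopB_acc : ∀ (ls : List String) (inh : Bool) (yn : List String)
    (rs : List (Int × List Int × Bool)),
    pvLoopB ls inh yn rs =
      (yn ++ (pvLoopB ls inh [] []).1, rs ++ (pvLoopB ls inh [] []).2) := by
  intro ls
  induction ls with
  | nil => intro inh yn rs; simp [pvLoopB]
  | cons l rest ih =>
    intro inh yn rs
    rw [pvLoopB, pvLoopB]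
    cases hg : (inh && !(PySem.Str.strip l == "New"))
    · simp only [Bool.false_eq_true, if_false]
      cases hp : PySem.Str.startswith (PySem.Str.strip l) "("
      · simp only [Bool.false_eq_true, if_false]
        by_cases h1 : ((PySem.Str.split? (PySem.Str.strip l) " ").getD []).length = 1
        · rw [if_pos h1, if_pos h1]
          rw [ih false (yn ++ [_]) rs, ih false ([] ++ [_]) []]
          simp
        · rw [if_neg h1, if_neg h1]
          cases hl : (((PySem.Str.split? (PySem.Str.strip l) " ").getD []).headI == "<=")
          · simp only [Bool.false_eq_true, if_false]
            rw [ih false yn (rs ++ [_]), ih false [] ([] ++ [_])]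
            simp
          · simp
      · simp only [if_true]
        exact ih false yn rs
    · simp only [if_true]
      exact ih inh yn rs

theorem pv_splitOn_go_ne_nil (sep : List Char) :
    ∀ (fuel : Nat) (l cur : List Char) (acc : List (List Char)),
      PySem.Chars.splitOn.go sep fuel l cur acc ≠ [] := by
  intro fuel
  induction fuel with
  | zero => intro l cur acc; simp [PySem.Chars.splitOn.go]
  | succ fuel ih =>
    intro l cur acc
    cases l with
    | nil => simp [PySem.Chars.splitOn.go]
    | cons c rest =>
      rw [PySem.Chars.splitOn.go]
      split
      · exact ih _ _ _
      · exact ih _ _ _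

theorem pv_split_ne_nil (line : String) : (PySem.Str.split? line " ").getD [] ≠ [] := by
  have h : PySem.Chars.split? line.toList [' '] = some (PySem.Chars.splitOn line.toList [' ']) := by
    simp [PySem.Chars.split?]
  have h2 : PySem.Chars.splitOn line.toList [' '] ≠ [] := by
    rw [PySem.Chars.splitOn]; exact pv_splitOn_go_ne_nil _ _ _ _ _
  simp [PySem.Str.split?, h]
  exact h2

theorem pv_mapIdx_id (l : List (PySem.Dict Int Int)) : l.mapIdx (fun _ a => a) = l := by
  induction l with
  | nil => rfl
  | cons a t ih => rw [List.mapIdx_cons]; simp [ih]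

set_option maxHeartbeats 2000000 in
theorem pvMain : ∀ (ls : List String) (yn : List String) (ys : List (PySem.Dict Int Int)) (inh : Bool),
    pvOk ls ys.length inh = true →
    pvLoopA ls yn ys inh =
      (yn ++ (pvLoopB ls inh [] []).1,
       ys.mapIdx (fun i d => (pvLoopB ls inh [] []).2.foldl (pvApplyB i) d) ++
         (List.range (pvLoopB ls inh [] []).1.length).map
           (fun k => (pvLoopB ls inh [] []).2.foldl (pvApplyB (ys.length + k)) PySem.Dict.empty)) := by
  intro ls
  induction ls with
  | nil =>
    intro yn ys inh _
    simp only [pvLoopA, pvLoopB, List.foldl_nil, List.length_nil, List.range_zero,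
      List.map_nil, List.append_nil, pv_mapIdx_id]
  | cons l rest ih =>
    intro yn ys inh h
    simp only [pvLoopA, pvLoopB]
    simp only [pvOk] at h
    cases hg : (inh && !(PySem.Str.strip l == "New")) with
    | true =>
      rw [hg] at h
      simp only [if_true]
      exact ih yn ys inh h
    | false =>
      rw [hg] at h
      simp only [Bool.false_eq_true, if_false] at h ⊢
      cases hp : PySem.Str.startswith (PySem.Str.strip l) "(" with
      | true =>
        rw [hp] at h
        simp only [if_true]
        exact ih yn ys false h
      | false =>
        rw [hp] at h
        simp only [Bool.false_eq_true, if_false] at h ⊢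
        rw [if_neg (by
          intro h0
          exact pv_split_ne_nil (PySem.Str.strip l) (List.length_eq_zero_iff.mp h0))]
        by_cases h1 : ((PySem.Str.split? (PySem.Str.strip l) " ").getD []).length = 1
        · rw [if_pos h1] at h
          rw [if_pos h1, if_pos h1]
          rw [pvLoopB_acc rest false ([] ++ [_]) []]
          have hlen : (ys ++ [(PySem.Dict.empty : PySem.Dict Int Int)]).length = ys.length + 1 := by
            simp
          have ih' := ih (yn ++ [((PySem.Str.split? (PySem.Str.strip l) " ").getD []).headI])
            (ys ++ [PySem.Dict.empty]) false (by rw [hlen]; exact h)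
          rw [ih', hlen]
          refine Prod.ext ?_ ?_
          · simp
          · rw [List.mapIdx_concat]
            have hL : (([] ++ [((PySem.Str.split? (PySem.Str.strip l) " ").getD []).headI] ++
                (pvLoopB rest false [] []).1)).length = (pvLoopB rest false [] []).1.length + 1 := by
              simp
            rw [hL, List.range_succ_eq_map, List.map_cons, List.map_map]
            simp only [List.append_assoc, List.singleton_append, Nat.add_zero,
              Function.comp_def, List.nil_append, Nat.succ_eq_add_one]
            refine congrArg₂ (· ++ ·) rfl (congrArg₂ List.cons rfl ?_)
            apply List.map_congr_left
            intro k _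
            congr 2
            omega
        · rw [if_neg h1] at h
          rw [if_neg h1, if_neg h1]
          cases hlast : (((PySem.Str.split? (PySem.Str.strip l) " ").getD []).headI == "<=") with
          | true =>
            rw [hlast] at h
            simp only [if_true]
            refine Prod.ext ?_ ?_
            · simp
            · simp only [List.nil_append, List.length_nil, List.range_zero, List.map_nil,
                List.append_nil, List.foldl_cons, List.foldl_nil]
              rw [pvUpdateA_eq_mapIdx]
          | false =>
            rw [hlast] at h
            simp only [Bool.false_eq_true, if_false] at h ⊢
            simp only [Bool.false_or, Bool.and_eq_true, decide_eq_true_eq] at h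
            obtain ⟨⟨hall, hle⟩, hrest⟩ := h
            rw [pvLoopB_acc rest false [] ([] ++ [_])]
            have hlen2 : (pvUpdateA ys
                ((PySem.Int.ofStr? ((PySem.Str.split? (PySem.Str.strip l) " ").getD []).headI).getD 0)
                ((PySem.Str.split? (PySem.Str.strip l) " ").getD []).tail false).length = ys.length := by
              rw [pvUpdateA_length]
            have ih' := ih yn (pvUpdateA ys
                ((PySem.Int.ofStr? ((PySem.Str.split? (PySem.Str.strip l) " ").getD []).headI).getD 0)
                ((PySem.Str.split? (PySem.Str.strip l) " ").getD []).tail false) false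
              (by rw [hlen2]; exact hrest)
            rw [ih', hlen2]
            refine Prod.ext ?_ ?_
            · simp
            · simp only [List.nil_append, List.singleton_append, List.foldl_cons]
              rw [pvUpdateA_eq_mapIdx, List.mapIdx_mapIdx]
              refine congrArg₂ (· ++ ·) ?_ ?_
              · simp only [Function.comp_def]
              · apply List.map_congr_left
                intro k _
                rw [pvApplyB_of_le _ _ _ (by simpa using Nat.le_trans hle (Nat.le_add_right _ k))]

theorem pv_final (t : String) (hpre : pvOk (PySem.Str.splitlines t) 0 true = true) :
    parse_norm_table t = parse_norm_table_alt t := by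
  unfold parse_norm_table parse_norm_table_alt
  rw [pvMain (PySem.Str.splitlines t) [] [] true (by simpa using hpre)]
  simp only [List.mapIdx_nil, List.nil_append, List.length_nil, Nat.zero_add]
  rfl

-- ===== VERDICT (by name: the statement is the Claim_ definition above) =====
theorem parse_norm_table_spec : Claim_equal_parse_norm_table := by
  intro norm_table_text _ hpre
  unfold Spec_parse_norm_table
  apply pv_final
  apply pvOk_of_cond
  intro i hi hy ha
  have h := hpre i hi hy ha
  simpa using h
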